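-- pv_equiv track=rewrite | github.com/SebastianDelgad/Trabajo-de-grado | backend/LeerObservaciones.py | procesado_txt
-- ===== SOURCE A (Python) =====
-- def procesado_txt(datos, vectorNombres):
--     vectorFinal = []
--     vectorDatosProcesados = []
--     nObservación = 0
--     union = ""
--
--     for word2 in datos:
--         if word2[0].isnumeric():
--             if int(word2[0]) > nObservación:
--                 vectorFinal.append(union)
--                 union = ""
--                 nObservación += 1
--             else:
--                 if int(word2[0]) <= nObservación:
--                     vectorFinal.append(union)
--                     union = ""
--
--         for nombre in vectorNombres:
--             if word2 == nombre:
--                 if len(union) > 0: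
--                     vectorFinal.append(union)
--                     union = ""
--                 vectorFinal.append(word2)
--                 break
--         else:
--             union += word2 + " "
--
--     vectorFinal.append(union)
--
--     # se elimina los elementos vacios que hay en el vector
--     for word3 in vectorFinal:
--         if len(word3) > 0:
--             vectorDatosProcesados.append(word3)
--
--     return vectorDatosProcesados
-- ===== SOURCE B (Python) =====
-- def procesado_txt(datos, vectorNombres):
--     # Two staged passes over explicit chunk lists instead of A's interleaved
--     # string-accumulator-with-flushes:
--     #   pass 1 groups the tokens into chunks (a name or a digit-led token opens
--     #   a new chunk, any other token extends the last one);
--     #   pass 2 renders each chunk (a name heads its own output element, the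
--     #   remaining tokens of a chunk are joined with spaces).
--     # A's observation counter is dead code (a digit-led token flushes in both
--     # of its branches), so B drops it; no trailing empty-filter pass is needed.
--     nombres = set(vectorNombres)
--
--     chunks = []
--     for t in datos:
--         if t in nombres or t[0].isdigit() or not chunks:
--             chunks.append([t])
--         else:
--             chunks[-1].append(t)
--
--     out = []
--     for ch in chunks:
--         if ch[0] in nombres:
--             out.append(ch[0])
--             if len(ch) > 1:
--                 out.append(" ".join(ch[1:]) + " ")
--         else:
--             out.append(" ".join(ch) + " ")
--     return out
-- ===== Notes on version B (the rewrite author's own statement) =====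
-- stated objective: faster
-- what changed: B replaces A's single interleaved loop (string accumulator with flush-on-break, an observation counter, and a trailing empty-filter pass) by two staged passes: first group the tokens into explicit chunk lists (a name or digit-led token opens a chunk, other tokens extend the last one), then render each chunk with a space-join; the dead observation counter and the empty-filter pass are dropped, and name membership uses a pre-built set instead of an inner scan.
-- outside the precondition, e.g. on procesado_txt([''], ['a']): A raises IndexError, B raises IndexError
import Mathlib
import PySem

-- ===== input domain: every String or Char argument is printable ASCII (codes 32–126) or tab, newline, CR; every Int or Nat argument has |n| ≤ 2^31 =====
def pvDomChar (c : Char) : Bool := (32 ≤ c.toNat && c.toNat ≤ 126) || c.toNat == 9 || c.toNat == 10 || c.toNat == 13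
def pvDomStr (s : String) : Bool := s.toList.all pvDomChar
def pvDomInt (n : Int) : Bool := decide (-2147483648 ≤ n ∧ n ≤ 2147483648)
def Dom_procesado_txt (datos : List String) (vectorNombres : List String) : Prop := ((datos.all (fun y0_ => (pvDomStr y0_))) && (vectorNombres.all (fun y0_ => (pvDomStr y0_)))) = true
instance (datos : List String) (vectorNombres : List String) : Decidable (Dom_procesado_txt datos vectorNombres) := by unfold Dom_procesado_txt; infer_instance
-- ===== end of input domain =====

-- B replaces A's interleaved string-accumulator-with-flushes (plus counter and
-- trailing empty-filter) by two staged passes: group tokens into explicit chunk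
-- lists, then render each chunk; the dead observation counter is dropped.

-- ===== PORT A =====
-- `union` is carried as a List Char (PySem.Chars) so string growth/length are kernel-transparent.
-- the for/else over vectorNombres with break: true iff some nombre equals word2
def pvMatchA (word2 : String) : List String → Bool
  | [] => false
  | n :: rest => if word2 = n then true else pvMatchA word2 rest

-- one iteration of A's main loop; state = (vectorFinal, nObservación, union)
-- int(word2[0]) under the isdigit guard is exactly (c.toNat - 48) for an ASCII digit c
def pvStepA (vectorNombres : List String) (st : List String × Int × List Char)
    (word2 : String) : List String × Int × List Char :=
  let st1 :=
    match PySem.Str.pyGet? word2 0 with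
    | none => st            -- Python raises IndexError here; excluded by Pre_
    | some c =>
      if PySem.Chars.isdigit c then   -- isnumeric = isdigit on the ASCII domain
        if ((c.toNat : Int) - 48) > st.2.1 then (st.1 ++ [String.ofList st.2.2], st.2.1 + 1, [])
        else if ((c.toNat : Int) - 48) ≤ st.2.1 then (st.1 ++ [String.ofList st.2.2], st.2.1, [])
        else st
      else st
  if pvMatchA word2 vectorNombres then
    if st1.2.2.length > 0 then (st1.1 ++ [String.ofList st1.2.2] ++ [word2], st1.2.1, [])
    else (st1.1 ++ [word2], st1.2.1, st1.2.2)
  else (st1.1, st1.2.1, st1.2.2 ++ word2.toList ++ [' '])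

def procesado_txt (datos : List String) (vectorNombres : List String) : List String :=
  let st := datos.foldl (pvStepA vectorNombres) ([], 0, [])
  let vectorFinal := st.1 ++ [String.ofList st.2.2]
  -- second loop: keep the non-empty elements
  vectorFinal.foldl (fun acc w => if (PySem.Str.len w) > 0 then acc ++ [w] else acc) []

-- ===== PORT B =====
-- " ".join(xs) + " " as a character list: tok1 ' ' tok2 ' ' … tokk ' '
-- (exact for the non-empty xs B joins; B never joins an empty list)
def pvSegChars : List String → List Char
  | [] => []
  | t :: ts => t.toList ++ ' ' :: pvSegChars ts

-- chunks[-1].append(t): append t to the last chunk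
def pvAppendLast : List (List String) → String → List (List String)
  | [], _ => []                               -- unreachable in B: guarded by `not chunks`
  | [c], t => [c ++ [t]]
  | c :: c' :: cs, t => c :: pvAppendLast (c' :: cs) t

-- pass 1 step: `if t in nombres or t[0].isdigit() or not chunks: chunks.append([t]) else: chunks[-1].append(t)`
def pvStepChunk (nombres : PySem.Set String) (cs : List (List String)) (t : String) : List (List String) :=
  if PySem.Set.contains nombres t
      || (match PySem.Str.pyGet? t 0 with   -- t[0]: Python raises IndexError on ""; excluded by Pre_
          | some c => PySem.Chars.isdigit c
          | none => false)
      || cs.isEmpty then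
    cs ++ [[t]]
  else pvAppendLast cs t

-- pass 2 step: render one chunk onto `out`
def pvRenderStep (nombres : PySem.Set String) (out : List String) (ch : List String) : List String :=
  match ch with
  | [] => out                                 -- unreachable in B: every chunk is non-empty
  | h :: rest =>
    if PySem.Set.contains nombres h then
      let out1 := out ++ [h]
      if PySem.List.len ch > 1 then out1 ++ [String.ofList (pvSegChars rest)] else out1
    else out ++ [String.ofList (pvSegChars ch)]

def procesado_txt_alt (datos : List String) (vectorNombres : List String) : List String :=
  let nombres := PySem.Set.ofList vectorNombres
  let chunks := datos.foldl (pvStepChunk nombres) []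
  chunks.foldl (pvRenderStep nombres) []

-- ===== PRECONDITION & SPEC =====
-- Pre_ excludes empty-string tokens, on which A raises IndexError at word2[0].
def Pre_procesado_txt (datos : List String) (vectorNombres : List String) : Prop :=
  ∀ s ∈ datos, s ≠ ""
instance (datos : List String) (vectorNombres : List String) : Decidable (Pre_procesado_txt datos vectorNombres) := by unfold Pre_procesado_txt; infer_instance
def pvWitness_procesado_txt : List String × List String :=
  (["1a", "Juan", "hola", "2", "mundo"], ["Juan", "Maria"])

def Spec_procesado_txt (datos : List String) (vectorNombres : List String) (out : List String) : Prop := out = procesado_txt_alt datos vectorNombres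
instance (datos : List String) (vectorNombres : List String) (out : List String) : Decidable (Spec_procesado_txt datos vectorNombres out) := by unfold Spec_procesado_txt; infer_instance

-- ===== CLAIM (what is proved, stated in full; the proofs are below) =====
def Claim_equal_procesado_txt : Prop := ∀ (datos : List String) (vectorNombres : List String), Dom_procesado_txt datos vectorNombres → Pre_procesado_txt datos vectorNombres → Spec_procesado_txt datos vectorNombres (procesado_txt datos vectorNombres)

-- ===== LEMMAS AND PROOFS =====

-- the non-empty filter that A's second loop computes
def pvFilt (xs : List String) : List String :=
  xs.filter (fun w => (PySem.Str.len w) > 0)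

theorem pvFilt_append_singleton (xs : List String) (x : String) :
    pvFilt (xs ++ [x]) = pvFilt xs ++ (if (PySem.Str.len x) > 0 then [x] else []) := by
  simp [pvFilt, List.filter_append]
  split_ifs <;> simp_all

theorem pvFoldl_filt (xs : List String) (acc : List String) :
    xs.foldl (fun acc w => if (PySem.Str.len w) > 0 then acc ++ [w] else acc) acc
      = acc ++ pvFilt xs := by
  induction xs generalizing acc with
  | nil => simp [pvFilt]
  | cons x xs ih =>
    simp only [List.foldl_cons, ih, pvFilt, List.filter_cons]
    split_ifs <;> simp_all

theorem pvMatchA_iff (w : String) (ns : List String) :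
    pvMatchA w ns = true ↔ w ∈ ns := by
  induction ns with
  | nil => simp [pvMatchA]
  | cons n rest ih =>
    simp only [pvMatchA]
    split_ifs with e
    · simp [e]
    · simp [List.mem_cons, e, ih]

theorem pvMatchA_eq_contains (w : String) (ns : List String) :
    pvMatchA w ns = PySem.Set.contains (PySem.Set.ofList ns) w := by
  rw [Bool.eq_iff_iff, pvMatchA_iff, PySem.Set.contains_iff, PySem.Set.mem_ofList]

theorem pvSegChars_append (xs : List String) (t : String) :
    pvSegChars (xs ++ [t]) = pvSegChars xs ++ t.toList ++ [' '] := by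
  induction xs with
  | nil => simp [pvSegChars]
  | cons a xs ih => simp [pvSegChars, ih]

theorem pvSegChars_eq_nil (xs : List String) : pvSegChars xs = [] ↔ xs = [] := by
  cases xs with
  | nil => simp [pvSegChars]
  | cons a xs =>
    simp only [pvSegChars]
    constructor
    · intro h
      have := congrArg List.length h
      simp at this
    · intro h; exact absurd h (by simp)

theorem pvAppendLast_concat (cs : List (List String)) (c : List String) (t : String) :
    pvAppendLast (cs ++ [c]) t = cs ++ [c ++ [t]] := by
  induction cs with
  | nil => rfl
  | cons a cs ih =>
    cases cs with
    | nil => rfl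
    | cons b cs' => simpa [pvAppendLast] using ih

-- the pending part of the chunk list: output already determined, and the union
-- characters still being accumulated (the tail of the last chunk)
def pvPend (nombres : PySem.Set String) : List (List String) → List String × List Char
  | [] => ([], [])
  | [ch] =>
    match ch with
    | [] => ([], [])
    | h :: rest =>
      if PySem.Set.contains nombres h then ([h], pvSegChars rest)
      else ([], pvSegChars (h :: rest))
  | ch :: ch' :: cs =>
    (pvRenderStep nombres [] ch ++ (pvPend nombres (ch' :: cs)).1, (pvPend nombres (ch' :: cs)).2)

theorem pvRenderStep_out (nb : PySem.Set String) (out : List String) (ch : List String) :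
    pvRenderStep nb out ch = out ++ pvRenderStep nb [] ch := by
  cases ch with
  | nil => simp [pvRenderStep]
  | cons h rest =>
    simp only [pvRenderStep]
    split_ifs <;> simp

theorem pvFoldl_render (nb : PySem.Set String) (cs : List (List String)) (out : List String) :
    cs.foldl (pvRenderStep nb) out = out ++ cs.flatMap (pvRenderStep nb []) := by
  induction cs generalizing out with
  | nil => simp
  | cons ch cs ih =>
    simp only [List.foldl_cons, List.flatMap_cons, ih, pvRenderStep_out nb out ch]
    simp

theorem pvPend_concat (nb : PySem.Set String) (cs : List (List String)) (ch : List String) :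
    pvPend nb (cs ++ [ch])
      = (cs.flatMap (pvRenderStep nb []) ++ (pvPend nb [ch]).1, (pvPend nb [ch]).2) := by
  induction cs with
  | nil => simp [pvPend]
  | cons a cs ih =>
    cases cs with
    | nil => simp [pvPend]
    | cons b cs' =>
      simp only [List.cons_append, List.flatMap_cons]
      rw [show pvPend nb (a :: b :: (cs' ++ [ch]))
            = (pvRenderStep nb [] a ++ (pvPend nb (b :: (cs' ++ [ch]))).1,
               (pvPend nb (b :: (cs' ++ [ch]))).2) from rfl]
      rw [show (b :: (cs' ++ [ch])) = (b :: cs' ++ [ch]) from rfl, ih]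
      simp

-- rendering a chunk list = its determined output ++ the flushed pending union (if non-empty)
theorem pvFlatten (nb : PySem.Set String) (cs : List (List String)) :
    cs.flatMap (pvRenderStep nb [])
      = (pvPend nb cs).1
        ++ (if (pvPend nb cs).2.length > 0 then [String.ofList (pvPend nb cs).2] else []) := by
  induction cs with
  | nil => simp [pvPend]
  | cons ch cs ih =>
    cases cs with
    | nil =>
      cases ch with
      | nil => simp [pvPend, pvRenderStep]
      | cons h rest =>
        by_cases hm : h ∈ nb
        · cases rest with
          | nil => simp [pvPend, pvRenderStep, hm, pvSegChars, PySem.List.len]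
          | cons r rs =>
            have hlen : (pvSegChars (r :: rs)).length > 0 :=
              List.length_pos_iff.mpr (by rw [ne_eq, pvSegChars_eq_nil]; simp)
            simp [pvPend, pvRenderStep, hm, PySem.List.len_eq, hlen]
        · have hlen : (pvSegChars (h :: rest)).length > 0 :=
            List.length_pos_iff.mpr (by rw [ne_eq, pvSegChars_eq_nil]; simp)
          simp [pvPend, pvRenderStep, hm, hlen]
    | cons ch' cs' =>
      simp only [List.flatMap_cons] at ih ⊢
      rw [show pvPend nb (ch :: ch' :: cs')
            = (pvRenderStep nb [] ch ++ (pvPend nb (ch' :: cs')).1,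
               (pvPend nb (ch' :: cs')).2) from rfl]
      rw [List.append_assoc, ← ih]

-- key step invariant: A's (filtered output, union) tracks B's pending view of the chunks
theorem pvStep_inv (ns : List String) (t : String) (ht : t ≠ "")
    (vf : List String) (n : Int) (u : List Char) (cs : List (List String))
    (h1 : pvFilt vf = (pvPend (PySem.Set.ofList ns) cs).1)
    (h2 : u = (pvPend (PySem.Set.ofList ns) cs).2) :
    pvFilt (pvStepA ns (vf, n, u) t).1
        = (pvPend (PySem.Set.ofList ns) (pvStepChunk (PySem.Set.ofList ns) cs t)).1 ∧
    (pvStepA ns (vf, n, u) t).2.2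
        = (pvPend (PySem.Set.ofList ns) (pvStepChunk (PySem.Set.ofList ns) cs t)).2 := by
  have hwl : t.toList ≠ [] := by
    intro h
    have h2' := congrArg String.ofList h
    rw [String.ofList_toList] at h2'
    exact ht h2'
  obtain ⟨c, cs0, hc⟩ := List.exists_cons_of_ne_nil hwl
  have hget : PySem.Str.pyGet? t 0 = some c := by
    rw [show (0:Int) = ((0:Nat):Int) from rfl, PySem.Str.pyGet?_natCast, hc]
    rfl
  have htlen : (PySem.Str.len t) > 0 := by
    simp [PySem.Str.len_eq, hc]
  have hflat := pvFlatten (PySem.Set.ofList ns) cs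
  -- flushing A's union after vf yields exactly the rendered chunks so far
  have hfl_u : pvFilt (vf ++ [String.ofList u])
      = cs.flatMap (pvRenderStep (PySem.Set.ofList ns) []) := by
    rw [pvFilt_append_singleton, h1, h2, hflat]
    congr 1
    split_ifs with hA hB hB <;>
      simp_all [PySem.Str.len_eq, String.toList_ofList]
  have hfl_t : ∀ w : List String, pvFilt (w ++ [t]) = pvFilt w ++ [t] := fun w => by
    rw [pvFilt_append_singleton, if_pos htlen]
  unfold pvStepA pvStepChunk
  rw [hget]
  simp only [← pvMatchA_eq_contains]
  by_cases hm : pvMatchA t ns = true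
  · -- name token: new chunk [[t]], A flushes and emits t
    have hmm : t ∈ ns := (pvMatchA_iff t ns).mp hm
    have hpend : pvPend (PySem.Set.ofList ns) (cs ++ [[t]])
        = (cs.flatMap (pvRenderStep (PySem.Set.ofList ns) []) ++ [t], []) := by
      rw [pvPend_concat]
      simp [pvPend, PySem.Set.mem_ofList, hmm, pvSegChars]
    simp only [hm, Bool.true_or, if_true, hpend]
    by_cases hd : PySem.Chars.isdigit c = true
    · simp only [hd, if_true]
      by_cases hgt : ((c.toNat : Int) - 48) > n
      · simp only [if_pos hgt, List.length_nil, gt_iff_lt, lt_irrefl, if_false]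
        exact ⟨by rw [hfl_t, hfl_u], trivial⟩
      · rw [if_neg hgt, if_pos (by omega : ((c.toNat : Int) - 48) ≤ n)]
        simp only [List.length_nil, gt_iff_lt, lt_irrefl, if_false]
        exact ⟨by rw [hfl_t, hfl_u], trivial⟩
    · simp only [hd, Bool.false_eq_true, if_false]
      by_cases hu : u.length > 0
      · simp only [if_pos hu]
        exact ⟨by rw [hfl_t, hfl_u], trivial⟩
      · simp only [if_neg hu]
        have hu0 : u = [] := by
          cases u with
          | nil => rfl
          | cons a l => simp at hu
        refine ⟨?_, hu0⟩
        rw [hfl_t, h1, hflat, ← h2, hu0]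
        simp
  · have hmf : pvMatchA t ns = false := by simpa using hm
    simp only [hmf, Bool.false_eq_true, if_false, Bool.false_or]
    have hmm : t ∉ ns := fun hmem => hm ((pvMatchA_iff t ns).mpr hmem)
    by_cases hd : PySem.Chars.isdigit c = true
    · -- digit-led non-name: new chunk [[t]], A flushes then starts union with t
      have hpend : pvPend (PySem.Set.ofList ns) (cs ++ [[t]])
          = (cs.flatMap (pvRenderStep (PySem.Set.ofList ns) []), t.toList ++ [' ']) := by
        rw [pvPend_concat]
        simp [pvPend, PySem.Set.mem_ofList, hmm, pvSegChars]
      simp only [hd, if_true, Bool.true_or, hpend]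
      by_cases hgt : ((c.toNat : Int) - 48) > n
      · simp only [if_pos hgt]
        exact ⟨hfl_u, by simp⟩
      · rw [if_neg hgt, if_pos (by omega : ((c.toNat : Int) - 48) ≤ n)]
        exact ⟨hfl_u, by simp⟩
    · -- plain word: extends the pending union / last chunk
      have hdf : PySem.Chars.isdigit c = false := by simpa using hd
      simp only [hdf, Bool.false_eq_true, if_false, Bool.false_or]
      rcases cs.eq_nil_or_concat with hcs | ⟨cs1, ch, hcs⟩
      · subst hcs
        simp only [List.isEmpty_nil, if_true]
        have hp : pvPend (PySem.Set.ofList ns) [[t]]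
            = ([], t.toList ++ [' ']) := by
          simp [pvPend, PySem.Set.mem_ofList, hmm, pvSegChars]
        simp only [pvPend] at h1 h2
        simp only [List.nil_append, hp]
        exact ⟨h1, by rw [h2]; simp⟩
      · rw [List.concat_eq_append] at hcs
        subst hcs
        have hne : (cs1 ++ [ch]).isEmpty = false := by simp
        simp only [hne, Bool.false_eq_true, if_false, pvAppendLast_concat]
        rw [pvPend_concat] at h1 h2
        rw [pvPend_concat]
        cases ch with
        | nil =>
          have hp1 : pvPend (PySem.Set.ofList ns) [([] : List String)] = ([], []) := by
            simp [pvPend]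
          have hp2 : pvPend (PySem.Set.ofList ns) [[t]]
              = ([], t.toList ++ [' ']) := by
            simp [pvPend, PySem.Set.mem_ofList, hmm, pvSegChars]
          simp only [hp1] at h1 h2
          simp only [List.nil_append, hp2]
          exact ⟨by simpa using h1, by rw [h2]; simp⟩
        | cons h rest =>
          by_cases hh : PySem.Set.contains (PySem.Set.ofList ns) h = true
          · have hp1 : pvPend (PySem.Set.ofList ns) [h :: rest] = ([h], pvSegChars rest) := by
              simp only [pvPend]
              rw [if_pos hh]
            have hp2 : pvPend (PySem.Set.ofList ns) [h :: (rest ++ [t])]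
                = ([h], pvSegChars rest ++ t.toList ++ [' ']) := by
              simp only [pvPend]
              rw [if_pos hh, pvSegChars_append]
            simp only [hp1] at h1 h2
            simp only [List.cons_append, hp2] at *
            exact ⟨h1, by rw [h2]⟩
          · have hp1 : pvPend (PySem.Set.ofList ns) [h :: rest]
                = ([], pvSegChars (h :: rest)) := by
              simp only [pvPend]
              rw [if_neg (by simpa using hh)]
            have hp2 : pvPend (PySem.Set.ofList ns) [h :: (rest ++ [t])]
                = ([], pvSegChars (h :: rest) ++ t.toList ++ [' ']) := by
              simp only [pvPend]
              rw [if_neg (by simpa using hh)]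
              have := pvSegChars_append (h :: rest) t
              simp only [List.cons_append] at this
              rw [this]
            simp only [hp1] at h1 h2
            simp only [List.cons_append, hp2] at *
            exact ⟨h1, by rw [h2]⟩

theorem pvLoop_inv (ns : List String) (datos : List String)
    (h : ∀ s ∈ datos, s ≠ "") :
    ∀ (vf : List String) (n : Int) (u : List Char) (cs : List (List String)),
      pvFilt vf = (pvPend (PySem.Set.ofList ns) cs).1 →
      u = (pvPend (PySem.Set.ofList ns) cs).2 →
      pvFilt (datos.foldl (pvStepA ns) (vf, n, u)).1
          = (pvPend (PySem.Set.ofList ns) (datos.foldl (pvStepChunk (PySem.Set.ofList ns)) cs)).1 ∧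
      (datos.foldl (pvStepA ns) (vf, n, u)).2.2
          = (pvPend (PySem.Set.ofList ns) (datos.foldl (pvStepChunk (PySem.Set.ofList ns)) cs)).2 := by
  induction datos with
  | nil => intro vf n u cs h1 h2; exact ⟨h1, h2⟩
  | cons w rest ih =>
    intro vf n u cs h1 h2
    have hw : w ≠ "" := h w List.mem_cons_self
    have hrest : ∀ s ∈ rest, s ≠ "" := fun s hs => h s (List.mem_cons_of_mem _ hs)
    have hstep := pvStep_inv ns w hw vf n u cs h1 h2
    simp only [List.foldl_cons]
    have := ih hrest (pvStepA ns (vf, n, u) w).1 (pvStepA ns (vf, n, u) w).2.1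
      (pvStepA ns (vf, n, u) w).2.2 (pvStepChunk (PySem.Set.ofList ns) cs w) hstep.1 hstep.2
    simpa using this

-- ===== VERDICT (by name: the statement is the Claim_ definition above) =====
theorem procesado_txt_spec : Claim_equal_procesado_txt := by
  intro datos ns _hdom hpre
  unfold Spec_procesado_txt procesado_txt procesado_txt_alt
  have hloop := pvLoop_inv ns datos hpre [] 0 [] [] (by simp [pvFilt, pvPend]) (by simp [pvPend])
  rw [pvFoldl_filt, pvFoldl_render, pvFilt_append_singleton, List.nil_append, List.nil_append,
    pvFlatten, hloop.1, hloop.2]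
  simp [PySem.Str.len_eq, String.toList_ofList, List.length_pos_iff]
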